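-- pv_equiv track=rewrite | github.com/MesutAltunkaynak/Collatz-Feistel-Cipher | main.py | generate_balanced_bits
-- ===== SOURCE A (Python) =====
-- def generate_balanced_bits(seed_val, n_bits):
--     """3. ve 4. Yöntemlerin Birleşimi: Von Neumann Düzeltici"""
--     bits = []
--     curr = seed_val
--     while len(bits) < n_bits * 10: # Dengeleme kaybı için fazla üret
--         if curr % 2 == 0:
--             curr //= 2
--             bits.append(0)
--         else:
--             curr = 3 * curr + 1
--             bits.append(1)
--         if curr <= 1: curr = seed_val + len(bits) + 13 # Döngü kırıcı
--
--     balanced = []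
--     for i in range(0, len(bits)-1, 2):
--         pair = bits[i:i+2]
--         if pair == [0, 1]: balanced.append(0)
--         elif pair == [1, 0]: balanced.append(1)
--         if len(balanced) == n_bits: break
--     return balanced
-- ===== SOURCE B (Python) =====
-- def generate_balanced_bits(seed_val, n_bits):
--     """Fused single pass: generate Collatz bits and Von Neumann-correct them on the fly,
--     keeping a one-bit pending buffer instead of materialising the raw bit list."""
--     balanced = []
--     curr = seed_val
--     count = 0
--     total = n_bits * 10
--     pending = None
--     while count < total:
--         if curr % 2 == 0:
--             curr //= 2
--             b = 0
--         else:
--             curr = 3 * curr + 1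
--             b = 1
--         count += 1
--         if curr <= 1:
--             curr = seed_val + count + 13
--         if pending is None:
--             pending = b
--         else:
--             if pending != b:
--                 balanced.append(pending)
--             pending = None
--             if len(balanced) == n_bits:
--                 break
--     return balanced
-- ===== Notes on version B (the rewrite author's own statement) =====
-- stated objective: faster
-- what changed: B fuses A's two phases (generate all 10*n Collatz bits into a list, then re-scan it in pairs) into a single loop with a generated-bit counter and a one-bit pending buffer, applying the Von Neumann rule on the fly and stopping as soon as n_bits balanced bits exist.
import Mathlib
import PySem

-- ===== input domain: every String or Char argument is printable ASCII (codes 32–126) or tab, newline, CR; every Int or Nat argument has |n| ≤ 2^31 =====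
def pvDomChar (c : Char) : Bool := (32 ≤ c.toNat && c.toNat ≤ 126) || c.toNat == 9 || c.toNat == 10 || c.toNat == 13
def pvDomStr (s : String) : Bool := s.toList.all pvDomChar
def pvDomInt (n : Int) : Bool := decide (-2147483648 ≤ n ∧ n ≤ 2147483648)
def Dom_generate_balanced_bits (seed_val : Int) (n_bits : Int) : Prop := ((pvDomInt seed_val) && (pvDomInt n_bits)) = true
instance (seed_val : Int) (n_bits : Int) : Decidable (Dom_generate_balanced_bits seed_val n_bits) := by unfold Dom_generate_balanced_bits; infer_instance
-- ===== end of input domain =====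

-- B fuses A's two phases (generate all 10*n bits, then scan pairs) into one pass with a
-- one-bit pending buffer and stops as soon as n_bits balanced bits exist; same return value,
-- no intermediate bit list (objective: faster by a constant factor, measured).

-- ===== PORT A =====
-- while len(bits) < n_bits * 10: step Collatz, append bit, loop-breaker reset
def pvGenLoop (seed_val n_bits : Int) (curr : Int) (bits : List Int) : List Int :=
  if h : (bits.length : Int) < n_bits * 10 then
    let curr1 : Int := if PySem.Int.mod curr 2 = 0 then PySem.Int.floordiv curr 2 else 3 * curr + 1
    let bits' : List Int := if PySem.Int.mod curr 2 = 0 then bits ++ [0] else bits ++ [1]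
    let curr2 : Int := if curr1 ≤ 1 then seed_val + (bits'.length : Int) + 13 else curr1
    pvGenLoop seed_val n_bits curr2 bits'
  else bits
termination_by (n_bits * 10 - (bits.length : Int)).toNat
decreasing_by split <;> (simp only [List.length_append, List.length_cons, List.length_nil]; omega)

-- for i in range(0, len(bits)-1, 2): von Neumann pair test, break at n_bits
def pvPairLoop (n_bits : Int) (bits : List Int) : List Int → List Int → List Int
  | [], balanced => balanced
  | i :: rest, balanced =>
    let pair := PySem.List.slice bits (some i) (some (i + 2))
    let balanced' := if pair = [0, 1] then balanced ++ [0]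
      else if pair = [1, 0] then balanced ++ [1] else balanced
    if (balanced'.length : Int) = n_bits then balanced'
    else pvPairLoop n_bits bits rest balanced'

def generate_balanced_bits (seed_val : Int) (n_bits : Int) : List Int :=
  let bits := pvGenLoop seed_val n_bits seed_val []
  pvPairLoop n_bits bits (PySem.List.pyRange 0 ((bits.length : Int) - 1) 2) []

-- ===== PORT B =====
-- one fused loop: Collatz step, counter, pending one-bit buffer, von Neumann on the fly
def pvFusedLoop (seed_val n_bits total : Int) (curr count : Int) (pending : Option Int)
    (balanced : List Int) : List Int :=
  if _h : count < total then
    let curr1 : Int := if PySem.Int.mod curr 2 = 0 then PySem.Int.floordiv curr 2 else 3 * curr + 1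
    let b : Int := if PySem.Int.mod curr 2 = 0 then 0 else 1
    let count' := count + 1
    let curr2 : Int := if curr1 ≤ 1 then seed_val + count' + 13 else curr1
    match pending with
    | none => pvFusedLoop seed_val n_bits total curr2 count' (some b) balanced
    | some p =>
      let balanced' := if p ≠ b then balanced ++ [p] else balanced
      if (balanced'.length : Int) = n_bits then balanced'
      else pvFusedLoop seed_val n_bits total curr2 count' none balanced'
  else balanced
termination_by (total - count).toNat
decreasing_by all_goals omega

def generate_balanced_bits_alt (seed_val : Int) (n_bits : Int) : List Int :=
  pvFusedLoop seed_val n_bits (n_bits * 10) seed_val 0 none []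

-- ===== PRECONDITION & SPEC =====
def Spec_generate_balanced_bits (seed_val : Int) (n_bits : Int) (out : List Int) : Prop := out = generate_balanced_bits_alt seed_val n_bits
instance (seed_val : Int) (n_bits : Int) (out : List Int) : Decidable (Spec_generate_balanced_bits seed_val n_bits out) := by unfold Spec_generate_balanced_bits; infer_instance

-- ===== CLAIM (what is proved, stated in full; the proofs are below) =====
def Claim_equal_generate_balanced_bits : Prop := ∀ (seed_val : Int) (n_bits : Int), Dom_generate_balanced_bits seed_val n_bits → Spec_generate_balanced_bits seed_val n_bits (generate_balanced_bits seed_val n_bits)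

-- ===== LEMMAS AND PROOFS =====

-- the raw bit stream both programs step through: m bits from state (curr, k bits generated so far)
def pvGen (seed : Int) : Nat → Int → Int → List Int
  | 0, _, _ => []
  | m + 1, curr, k =>
    let curr1 : Int := if PySem.Int.mod curr 2 = 0 then PySem.Int.floordiv curr 2 else 3 * curr + 1
    let b : Int := if PySem.Int.mod curr 2 = 0 then 0 else 1
    let curr2 : Int := if curr1 ≤ 1 then seed + (k + 1) + 13 else curr1
    b :: pvGen seed m curr2 (k + 1)

-- von Neumann pair consumption with A's break rule, structurally on the bit list
def pvPairs (n_bits : Int) : List Int → List Int → List Int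
  | [], acc => acc
  | [_], acc => acc
  | b0 :: b1 :: rest, acc =>
    let acc' := if b0 ≠ b1 then acc ++ [b0] else acc
    if (acc'.length : Int) = n_bits then acc' else pvPairs n_bits rest acc'

lemma pvGen_length (seed : Int) : ∀ (m : Nat) (curr k : Int), (pvGen seed m curr k).length = m := by
  intro m
  induction m with
  | zero => intro curr k; simp [pvGen]
  | succ m ih => intro curr k; simp [pvGen, ih]

lemma pvGen_01 (seed : Int) : ∀ (m : Nat) (curr k : Int), ∀ x ∈ pvGen seed m curr k, x = 0 ∨ x = 1 := by
  intro m
  induction m with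
  | zero => intro curr k x hx; simp [pvGen] at hx
  | succ m ih =>
    intro curr k x hx
    simp only [pvGen, List.mem_cons] at hx
    rcases hx with h | h
    · subst h; split <;> simp
    · exact ih _ _ x h

lemma pvGenLoop_eq (seed n : Int) : ∀ (m : Nat) (curr : Int) (bits : List Int),
    (n * 10 - (bits.length : Int)).toNat = m →
    pvGenLoop seed n curr bits = bits ++ pvGen seed m curr (bits.length : Int) := by
  intro m
  induction m with
  | zero =>
    intro curr bits hm
    rw [pvGenLoop.eq_def, dif_neg (by omega)]
    simp [pvGen]
  | succ m ih =>
    intro curr bits hm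
    rw [pvGenLoop.eq_def, dif_pos (by omega)]
    simp only [pvGen]
    by_cases hp : PySem.Int.mod curr 2 = 0
    · simp only [if_pos hp]
      rw [ih _ (bits ++ [0]) (by simp; omega)]
      simp only [List.length_append, List.length_cons, List.length_nil]
      push_cast
      simp
    · simp only [if_neg hp]
      rw [ih _ (bits ++ [1]) (by simp; omega)]
      simp only [List.length_append, List.length_cons, List.length_nil]
      push_cast
      simp

-- my own unfolding of range(a, b, 2); no named PySem lemma gives the cons form for step 2
lemma pvRange2_cons (a b : Int) :
    PySem.List.pyRange a b 2 = if a < b then a :: PySem.List.pyRange (a + 2) b 2 else [] := by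
  rw [PySem.List.pyRange_of_pos a b (by norm_num), PySem.List.pyRange_of_pos (a+2) b (by norm_num)]
  split
  · rename_i hab
    have hc : ((b - a + 2 - 1) / 2).toNat
        = (if a + 2 < b then ((b - (a + 2) + 2 - 1) / 2).toNat else 0) + 1 := by
      split <;> omega
    rw [hc, List.range_succ_eq_map]
    simp only [List.map_cons, List.map_map, Nat.cast_zero, mul_zero, add_zero]
    congr 1
    apply List.map_congr_left
    intro k _
    simp only [Function.comp_apply]
    push_cast
    ring
  · simp

lemma pvPairs_short (n : Int) (l : List Int) (acc : List Int) (h : l.length ≤ 1) :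
    pvPairs n l acc = acc := by
  match l with
  | [] => rfl
  | [_] => rfl
  | _ :: _ :: _ => simp at h

lemma pvPairLoop_eq (n : Int) (bits : List Int) (h01 : ∀ x ∈ bits, x = 0 ∨ x = 1) :
    ∀ (t j : Nat) (acc : List Int), bits.length ≤ j + t →
    pvPairLoop n bits (PySem.List.pyRange (j : Int) ((bits.length : Int) - 1) 2) acc
      = pvPairs n (bits.drop j) acc := by
  intro t
  induction t with
  | zero =>
    intro j acc ht
    rw [pvRange2_cons, if_neg (by omega)]
    rw [pvPairs_short n _ acc (by simp; omega)]
    rfl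
  | succ t ih =>
    intro j acc ht
    by_cases hlt : (j : Int) < (bits.length : Int) - 1
    · rw [pvRange2_cons, if_pos hlt]
      have hj1 : j + 1 < bits.length := by omega
      have hj : j < bits.length := by omega
      have hdrop : bits.drop j = bits[j] :: bits[j+1] :: bits.drop (j + 2) := by
        rw [List.drop_eq_getElem_cons hj, List.drop_eq_getElem_cons hj1]
      have hslice : PySem.List.slice bits (some (j : Int)) (some ((j : Int) + 2))
          = [bits[j], bits[j+1]] := by
        have h2 : ((j : Int) + 2) = ((j + 2 : Nat) : Int) := by push_cast; ring
        have ht2 : j + 2 - j = 2 := by omega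
        rw [h2, PySem.List.slice_natCast, hdrop, ht2]
        rfl
      simp only [pvPairLoop, hslice, hdrop, pvPairs]
      have hrec : PySem.List.pyRange ((j : Int) + 2) ((bits.length : Int) - 1) 2
          = PySem.List.pyRange ((j + 2 : Nat) : Int) ((bits.length : Int) - 1) 2 := by
        push_cast; ring_nf
      have heq : (if [bits[j], bits[j+1]] = ([0, 1] : List Int) then acc ++ [0]
            else if [bits[j], bits[j+1]] = ([1, 0] : List Int) then acc ++ [1] else acc)
          = (if bits[j] ≠ bits[j+1] then acc ++ [bits[j]] else acc) := by
        rcases h01 bits[j] (by simp) with h0 | h0 <;>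
          rcases h01 bits[j+1] (by simp) with h1 | h1 <;>
          simp [h0, h1]
      rw [heq, hrec]
      set acc2 := if bits[j] ≠ bits[j+1] then acc ++ [bits[j]] else acc with hacc2
      split
      · rfl
      · exact ih (j + 2) _ (by omega)
    · rw [pvRange2_cons, if_neg hlt]
      rw [pvPairs_short n _ acc (by simp; omega)]
      rfl

lemma pvFusedLoop_eq (seed n total : Int) : ∀ (m : Nat) (curr count : Int)
    (pending : Option Int) (acc : List Int), (total - count).toNat = m →
    pvFusedLoop seed n total curr count pending acc
      = pvPairs n (pending.toList ++ pvGen seed m curr count) acc := by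
  intro m
  induction m with
  | zero =>
    intro curr count pending acc hm
    rw [pvFusedLoop.eq_def, dif_neg (by omega)]
    rcases pending with _ | p <;> simp [pvGen, pvPairs_short]
  | succ m ih =>
    intro curr count pending acc hm
    rw [pvFusedLoop.eq_def, dif_pos (by omega)]
    dsimp only
    set curr1 : Int := if PySem.Int.mod curr 2 = 0 then PySem.Int.floordiv curr 2 else 3 * curr + 1 with hc1
    set b : Int := if PySem.Int.mod curr 2 = 0 then 0 else 1 with hbb
    set curr2 : Int := if curr1 ≤ 1 then seed + (count + 1) + 13 else curr1 with hc2
    have hgen : pvGen seed (m + 1) curr count = b :: pvGen seed m curr2 (count + 1) := by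
      simp only [pvGen]
      rw [hbb, hc2, hc1]
    rcases pending with _ | p
    · rw [ih curr2 (count + 1) (some b) acc (by omega), hgen]
      simp
    · rw [hgen]
      simp only [Option.toList, List.cons_append, List.nil_append, pvPairs]
      set acc2 := if p ≠ b then acc ++ [p] else acc with hacc2
      split
      · rfl
      · rw [ih curr2 (count + 1) none acc2 (by omega)]
        simp

-- ===== VERDICT (by name: the statement is the Claim_ definition above) =====
theorem generate_balanced_bits_spec : Claim_equal_generate_balanced_bits := by
  intro seed n _
  unfold Spec_generate_balanced_bits generate_balanced_bits generate_balanced_bits_alt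
  set N : Nat := (n * 10).toNat with hN
  have hA : pvGenLoop seed n seed [] = pvGen seed N seed 0 := by
    rw [pvGenLoop_eq seed n N seed [] (by simp [hN])]
    simp
  rw [hA, pvFusedLoop_eq seed n (n * 10) N seed 0 none [] (by simp [hN])]
  simp only [Option.toList, List.nil_append]
  have hlen : ((pvGen seed N seed 0).length : Int) = (N : Int) := by rw [pvGen_length]
  have := pvPairLoop_eq n (pvGen seed N seed 0) (pvGen_01 seed N seed 0)
      (pvGen seed N seed 0).length 0 []
  simp only [Nat.cast_zero, List.drop_zero] at this
  rw [this (by omega)]
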